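-- pv_equiv track=rewrite | github.com/yashu0598/Code-Signal | cipher26.py | cipher26
-- ===== SOURCE A (Python) =====
-- def cipher26(message):
--     output = []
--     Sum = 0
--     for i in range(0,len(message)):
--         temp = (ord(message[i])-ord('a')-Sum+26)%26
--         Sum += temp
--         output.append(chr(temp+ord('a')))
--     return "".join(output)
-- ===== SOURCE B (Python) =====
-- def cipher26(message):
--     codes = [ord(c) - ord('a') for c in message]
--     return "".join(chr((b - a) % 26 + ord('a'))
--                    for a, b in zip([0] + codes, codes))
-- ===== Notes on version B (the rewrite author's own statement) =====
-- stated objective: simpler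
-- what changed: A maintains a running cumulative sum of the outputs and subtracts it each step; B observes that this sum is always congruent to the previous input letter mod 26, so it builds the code list once and emits the consecutive differences mod 26 in a zip pass, with no accumulator.
import Mathlib
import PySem

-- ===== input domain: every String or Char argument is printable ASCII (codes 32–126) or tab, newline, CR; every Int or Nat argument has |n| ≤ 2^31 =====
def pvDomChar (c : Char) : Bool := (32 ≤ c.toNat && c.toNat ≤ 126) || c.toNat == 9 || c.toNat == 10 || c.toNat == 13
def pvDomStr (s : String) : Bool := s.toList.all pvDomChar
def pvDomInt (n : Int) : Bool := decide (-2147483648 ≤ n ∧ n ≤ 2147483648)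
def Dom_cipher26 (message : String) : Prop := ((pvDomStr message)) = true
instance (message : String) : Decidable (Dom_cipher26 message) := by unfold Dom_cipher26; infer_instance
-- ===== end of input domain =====

-- B replaces A's running output-sum accumulator by a zip over consecutive input codes (same O(n) cost).

-- ===== PORT A =====
-- loop: for each char, temp = (ord(c)-97-Sum+26)%26, Sum += temp, append chr(temp+97)
def cipher26 (message : String) : String :=
  let st := message.toList.foldl
    (fun (st : List Char × Int) c =>
      let temp := PySem.Int.mod ((c.toNat : Int) - 97 - st.2 + 26) 26
      (st.1 ++ [Char.ofNat (temp + 97).toNat], st.2 + temp))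
    ([], 0)
  String.mk st.1

-- ===== PORT B =====
def cipher26_alt (message : String) : String :=
  let codes := message.toList.map (fun c => (c.toNat : Int) - 97)
  String.mk (((0 :: codes).zip codes).map
    (fun p => Char.ofNat (PySem.Int.mod (p.2 - p.1) 26 + 97).toNat))

-- ===== PRECONDITION & SPEC =====
def Spec_cipher26 (message : String) (out : String) : Prop := out = cipher26_alt message
instance (message : String) (out : String) : Decidable (Spec_cipher26 message out) := by unfold Spec_cipher26; infer_instance

-- ===== CLAIM (what is proved, stated in full; the proofs are below) =====
def Claim_equal_cipher26 : Prop := ∀ (message : String), Dom_cipher26 message → Spec_cipher26 message (cipher26 message)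

-- ===== LEMMAS AND PROOFS =====

theorem cipher26_loop (l : List Char) (acc : List Char) (S prev : Int)
    (h : S % 26 = prev % 26) :
    (l.foldl
      (fun (st : List Char × Int) c =>
        let temp := PySem.Int.mod ((c.toNat : Int) - 97 - st.2 + 26) 26
        (st.1 ++ [Char.ofNat (temp + 97).toNat], st.2 + temp))
      (acc, S)).1
    = acc ++ ((prev :: l.map (fun c => (c.toNat : Int) - 97)).zip
        (l.map (fun c => (c.toNat : Int) - 97))).map
        (fun p => Char.ofNat (PySem.Int.mod (p.2 - p.1) 26 + 97).toNat) := by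
  induction l generalizing acc S prev with
  | nil => simp
  | cons c tl ih =>
    simp only [List.foldl_cons, List.map_cons, List.zip_cons_cons, List.map_cons]
    have h26 : (0:Int) < 26 := by norm_num
    have e1 : PySem.Int.mod ((c.toNat : Int) - 97 - S + 26) 26
        = PySem.Int.mod ((c.toNat : Int) - 97 - prev) 26 := by
      rw [PySem.Int.mod_eq_emod_of_pos h26, PySem.Int.mod_eq_emod_of_pos h26]
      omega
    simp only [e1]
    rw [ih (acc ++ [Char.ofNat (PySem.Int.mod ((c.toNat : Int) - 97 - prev) 26 + 97).toNat])
        (S + PySem.Int.mod ((c.toNat : Int) - 97 - prev) 26) ((c.toNat : Int) - 97)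
        (by rw [PySem.Int.mod_eq_emod_of_pos h26]; omega)]
    simp

-- ===== VERDICT (by name: the statement is the Claim_ definition above) =====
theorem cipher26_spec : Claim_equal_cipher26 := by
  intro message _
  unfold Spec_cipher26 cipher26 cipher26_alt
  simp only
  rw [cipher26_loop message.toList [] 0 0 rfl]
  simp
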